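-- pv_equiv track=rewrite | github.com/PradeC123/HackerRank-Solutions- | closestnumber.py | closestNumbers
-- ===== SOURCE A (Python) =====
-- def closestNumbers(arr):
--     arr.sort() # Sort the array
--     min_diff = float('inf')
--
--     # Find the minimum difference
--     for i in range(len(arr)-1):
--         diff = abs(arr[i] - arr[i+1])
--         if diff < min_diff:
--             min_diff = diff
--
--     result = []
--
--     for i in range(len(arr)-1):
--         diff = abs(arr[i] - arr[i+1])
--         if diff == min_diff:
--             result.append(arr[i])
--             result.append(arr[i+1])
--     return result
-- ===== SOURCE B (Python) =====
-- def closestNumbers(arr):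
--     arr.sort()  # same in-place sort as A
--     min_diff = None
--     result = []
--     for a, b in zip(arr, arr[1:]):
--         diff = abs(a - b)
--         if min_diff is None or diff < min_diff:
--             min_diff = diff
--             result = [a, b]
--         elif diff == min_diff:
--             result.append(a)
--             result.append(b)
--     return result
-- ===== Notes on version B (the rewrite author's own statement) =====
-- stated objective: simpler
-- what changed: A makes two index-based passes (first compute the minimum adjacent difference, then collect all pairs achieving it); B makes one pass over zipped adjacent pairs, maintaining the running minimum and resetting/extending the result list as it goes.
import Mathlib
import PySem

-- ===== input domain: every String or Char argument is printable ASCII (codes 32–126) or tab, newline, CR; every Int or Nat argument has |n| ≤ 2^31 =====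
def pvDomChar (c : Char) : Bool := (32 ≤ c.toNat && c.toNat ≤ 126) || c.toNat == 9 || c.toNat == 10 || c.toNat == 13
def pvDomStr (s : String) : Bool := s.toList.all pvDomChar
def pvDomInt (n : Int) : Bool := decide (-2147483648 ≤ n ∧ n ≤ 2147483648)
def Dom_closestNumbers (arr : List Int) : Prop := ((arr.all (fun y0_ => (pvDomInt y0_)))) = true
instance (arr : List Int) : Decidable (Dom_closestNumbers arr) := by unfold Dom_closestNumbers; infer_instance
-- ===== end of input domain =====

-- B replaces A's two index-based passes (find the minimum adjacent difference, then collect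
-- the pairs achieving it) by one pass over zipped adjacent pairs that maintains the running
-- minimum and resets/extends the result list (objective: simpler). Python A sorts arr in
-- place (B does the same); the equivalence proved here is about the return value.

-- ===== PORT A =====
def closestNumbers (arr : List Int) : List Int :=
  let s := PySem.List.sorted arr (fun x => x) false   -- arr.sort()
  let n : Int := s.length
  -- first loop: find the minimum difference (min_diff starts at float('inf') = none)
  let minDiff : Option Int :=
    (PySem.List.pyRange 0 (n - 1) 1).foldl (fun md i =>
      let diff : Int := |PySem.List.pyGetD s i 0 - PySem.List.pyGetD s (i + 1) 0|
      match md with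
      | none => some diff
      | some m => if diff < m then some diff else md) none
  -- second loop: collect every adjacent pair whose difference equals min_diff
  (PySem.List.pyRange 0 (n - 1) 1).foldl (fun res i =>
    let diff : Int := |PySem.List.pyGetD s i 0 - PySem.List.pyGetD s (i + 1) 0|
    if some diff = minDiff then
      res ++ [PySem.List.pyGetD s i 0, PySem.List.pyGetD s (i + 1) 0]
    else res) []

-- ===== PORT B =====
def closestNumbers_alt (arr : List Int) : List Int :=
  let s := PySem.List.sorted arr (fun x => x) false   -- arr.sort()
  -- single pass over zip(arr, arr[1:]) maintaining (min_diff, result)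
  ((s.zip (PySem.List.slice s (some 1) none)).foldl (fun st p =>
      let diff : Int := |p.1 - p.2|
      match st.1 with
      | none => (some diff, [p.1, p.2])
      | some m =>
        if diff < m then (some diff, [p.1, p.2])
        else if diff = m then (st.1, st.2 ++ [p.1, p.2])
        else st)
    ((none : Option Int), ([] : List Int))).2

-- ===== PRECONDITION & SPEC =====
def Spec_closestNumbers (arr : List Int) (out : List Int) : Prop := out = closestNumbers_alt arr
instance (arr : List Int) (out : List Int) : Decidable (Spec_closestNumbers arr out) := by unfold Spec_closestNumbers; infer_instance

-- ===== CLAIM (what is proved, stated in full; the proofs are below) =====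
def Claim_equal_closestNumbers : Prop := ∀ (arr : List Int), Dom_closestNumbers arr → Spec_closestNumbers arr (closestNumbers arr)

-- ===== LEMMAS AND PROOFS =====

-- proof-side vocabulary: the two loop bodies lifted to adjacent pairs
def pvDiff (p : Int × Int) : Int := |p.1 - p.2|

def pvStepA (md : Option Int) (p : Int × Int) : Option Int :=
  match md with
  | none => some (pvDiff p)
  | some m => if pvDiff p < m then some (pvDiff p) else md

def pvStepB (st : Option Int × List Int) (p : Int × Int) : Option Int × List Int :=
  match st.1 with
  | none => (some (pvDiff p), [p.1, p.2])
  | some m =>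
    if pvDiff p < m then (some (pvDiff p), [p.1, p.2])
    else if pvDiff p = m then (st.1, st.2 ++ [p.1, p.2])
    else st

def pvMin (m : Int) (ps : List (Int × Int)) : Int :=
  ps.foldl (fun m p => if pvDiff p < m then pvDiff p else m) m

def pvCollect (M : Int) (r : List Int) (ps : List (Int × Int)) : List Int :=
  ps.foldl (fun r p => if pvDiff p = M then r ++ [p.1, p.2] else r) r

lemma pvMin_le (ps : List (Int × Int)) (m : Int) : pvMin m ps ≤ m := by
  induction ps generalizing m with
  | nil => simp [pvMin]
  | cons p tl ih =>
    simp only [pvMin, List.foldl_cons]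
    by_cases h : pvDiff p < m
    · simp only [h, if_pos]
      exact le_trans (ih (pvDiff p)) (le_of_lt h)
    · simp only [h, if_neg, not_false_iff]
      exact ih m

lemma pvMin_cons (p : Int × Int) (tl : List (Int × Int)) (m : Int) :
    pvMin m (p :: tl) = pvMin (if pvDiff p < m then pvDiff p else m) tl := rfl

lemma pvCollect_append (M : Int) (r : List Int) (ps : List (Int × Int)) :
    pvCollect M r ps = r ++ pvCollect M [] ps := by
  induction ps generalizing r with
  | nil => simp [pvCollect]
  | cons p tl ih =>
    simp only [pvCollect, List.foldl_cons] at *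
    by_cases h : pvDiff p = M
    · simp only [h, if_pos]
      rw [ih (r ++ [p.1, p.2]), ih ([] ++ [p.1, p.2])]
      simp
    · simp only [h, if_neg, not_false_iff]
      exact ih r

lemma pvCollect_cons (M : Int) (p : Int × Int) (tl : List (Int × Int)) :
    pvCollect M [] (p :: tl) =
      (if pvDiff p = M then [p.1, p.2] else []) ++ pvCollect M [] tl := by
  show pvCollect M (if pvDiff p = M then [] ++ [p.1, p.2] else []) tl = _
  by_cases hd : pvDiff p = M
  · rw [if_pos hd, if_pos hd, List.nil_append]
    exact pvCollect_append _ _ _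
  · rw [if_neg hd, if_neg hd, List.nil_append]

lemma pvFoldA_some (ps : List (Int × Int)) (m : Int) :
    ps.foldl pvStepA (some m) = some (pvMin m ps) := by
  induction ps generalizing m with
  | nil => simp [pvMin]
  | cons p tl ih =>
    rw [List.foldl_cons, pvMin_cons]
    by_cases h : pvDiff p < m
    · simp [pvStepA, h, ih]
    · simp [pvStepA, h, ih]

lemma pvFoldB_some (ps : List (Int × Int)) (m : Int) (res : List Int) :
    ps.foldl pvStepB (some m, res) =
      (some (pvMin m ps),
       (if pvMin m ps = m then res else []) ++ pvCollect (pvMin m ps) [] ps) := by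
  induction ps generalizing m res with
  | nil => simp [pvMin, pvCollect]
  | cons p tl ih =>
    rw [List.foldl_cons, pvMin_cons]
    by_cases h : pvDiff p < m
    · -- strict decrease: reset the result
      have hstep : pvStepB (some m, res) p = (some (pvDiff p), [p.1, p.2]) := by
        show (if pvDiff p < m then (some (pvDiff p), [p.1, p.2])
              else if pvDiff p = m then ((some m : Option Int), res ++ [p.1, p.2])
              else (some m, res)) = (some (pvDiff p), [p.1, p.2])
        rw [if_pos h]
      have hne : pvMin (pvDiff p) tl ≠ m :=
        ne_of_lt (lt_of_le_of_lt (pvMin_le tl (pvDiff p)) h)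
      rw [hstep, ih, if_pos h, if_neg hne, pvCollect_cons, List.nil_append]
      by_cases hd : pvDiff p = pvMin (pvDiff p) tl
      · rw [if_pos hd, if_pos hd.symm]
      · rw [if_neg hd, if_neg (Ne.symm hd)]
    · by_cases he : pvDiff p = m
      · -- equal difference: extend the result
        have hstep : pvStepB (some m, res) p = (some m, res ++ [p.1, p.2]) := by
          show (if pvDiff p < m then (some (pvDiff p), [p.1, p.2])
                else if pvDiff p = m then ((some m : Option Int), res ++ [p.1, p.2])
                else (some m, res)) = ((some m : Option Int), res ++ [p.1, p.2])
          rw [if_neg h, if_pos he]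
        rw [hstep, ih, if_neg h, pvCollect_cons]
        by_cases hm : pvMin m tl = m
        · rw [if_pos hm, if_pos hm, if_pos (he.trans hm.symm), List.append_assoc]
        · have hd : pvDiff p ≠ pvMin m tl := by rw [he]; exact Ne.symm hm
          rw [if_neg hm, if_neg hm, if_neg hd]
          simp
      · -- larger difference: skip the pair
        have hstep : pvStepB (some m, res) p = (some m, res) := by
          show (if pvDiff p < m then (some (pvDiff p), [p.1, p.2])
                else if pvDiff p = m then ((some m : Option Int), res ++ [p.1, p.2])
                else (some m, res)) = ((some m : Option Int), res)
          rw [if_neg h, if_neg he]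
        have hd : pvDiff p ≠ pvMin m tl := by
          intro hh
          exact h (lt_of_le_of_ne (hh ▸ pvMin_le tl m) he)
        rw [hstep, ih, if_neg h, pvCollect_cons, if_neg hd, List.nil_append]

-- the pair-level statement: A's two folds agree with B's single fold
lemma pvPair_main (ps : List (Int × Int)) :
    (ps.foldl (fun r p =>
        if some (pvDiff p) = ps.foldl pvStepA none then r ++ [p.1, p.2] else r) []) =
      (ps.foldl pvStepB ((none : Option Int), ([] : List Int))).2 := by
  cases ps with
  | nil => simp
  | cons p tl =>
    have hA : (p :: tl).foldl pvStepA none = some (pvMin (pvDiff p) tl) := by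
      rw [List.foldl_cons]
      exact pvFoldA_some tl (pvDiff p)
    have hB : (p :: tl).foldl pvStepB ((none : Option Int), ([] : List Int)) =
        (some (pvMin (pvDiff p) tl),
         (if pvMin (pvDiff p) tl = pvDiff p then [p.1, p.2] else []) ++
           pvCollect (pvMin (pvDiff p) tl) [] tl) := by
      rw [List.foldl_cons]
      have hstep : pvStepB ((none : Option Int), ([] : List Int)) p =
          (some (pvDiff p), [p.1, p.2]) := rfl
      rw [hstep, pvFoldB_some]
    rw [hA, hB]
    have hcong : (p :: tl).foldl (fun r q =>
          if some (pvDiff q) = some (pvMin (pvDiff p) tl) then r ++ [q.1, q.2] else r) [] =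
        pvCollect (pvMin (pvDiff p) tl) [] (p :: tl) := by
      refine PySem.List.foldl_congr_mem _ _ _ _ ?_
      intro r q _
      simp
    rw [hcong, pvCollect_cons]
    by_cases hd : pvDiff p = pvMin (pvDiff p) tl
    · rw [if_pos hd, if_pos hd.symm]
    · rw [if_neg hd, if_neg (Ne.symm hd)]

-- the index loops of A run over exactly the adjacent pairs
lemma pvPairs_map (s : List Int) :
    (PySem.List.pyRange 0 ((s.length : Int) - 1) 1).map
      (fun i => (PySem.List.pyGetD s i 0, PySem.List.pyGetD s (i + 1) 0)) =
      s.zip s.tail := by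
  cases s with
  | nil => decide
  | cons a t =>
    have hlen : ((a :: t).length : Int) - 1 = (t.length : Int) := by
      simp
    rw [hlen, PySem.List.pyRange_zero_natCast, List.map_map]
    apply List.ext_getElem
    · simp [List.length_zip]
    · intro i hi1 hi2
      simp only [List.length_map, List.length_range] at hi1
      have hcast : ((i : Int) + 1) = ((i + 1 : Nat) : Int) := by push_cast; ring
      simp only [List.getElem_map, List.getElem_range, Function.comp_apply, hcast,
        PySem.List.pyGetD_natCast, List.getElem_zip, List.getElem_tail]
      have h1 : i < (a :: t).length := by simp; omega
      have h2 : i + 1 < (a :: t).length := by simp; omega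
      rw [List.getD_eq_getElem _ _ h1, List.getD_eq_getElem _ _ h2]

-- the whole-program statement, with the sorted list abstracted as s
lemma pvMain (s : List Int) :
    (PySem.List.pyRange 0 ((s.length : Int) - 1) 1).foldl (fun res i =>
      let diff : Int := |PySem.List.pyGetD s i 0 - PySem.List.pyGetD s (i + 1) 0|
      if some diff = (PySem.List.pyRange 0 ((s.length : Int) - 1) 1).foldl (fun md i =>
          let diff : Int := |PySem.List.pyGetD s i 0 - PySem.List.pyGetD s (i + 1) 0|
          match md with
          | none => some diff
          | some m => if diff < m then some diff else md) none then
        res ++ [PySem.List.pyGetD s i 0, PySem.List.pyGetD s (i + 1) 0]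
      else res) [] =
    ((s.zip (PySem.List.slice s (some 1) none)).foldl (fun st p =>
      let diff : Int := |p.1 - p.2|
      match st.1 with
      | none => (some diff, [p.1, p.2])
      | some m =>
        if diff < m then (some diff, [p.1, p.2])
        else if diff = m then (st.1, st.2 ++ [p.1, p.2])
        else st)
      ((none : Option Int), ([] : List Int))).2 := by
  rw [PySem.List.slice_from_one]
  have hA1 : (PySem.List.pyRange 0 ((s.length : Int) - 1) 1).foldl (fun md i =>
      let diff : Int := |PySem.List.pyGetD s i 0 - PySem.List.pyGetD s (i + 1) 0|
      match md with
      | none => some diff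
      | some m => if diff < m then some diff else md) none =
      (s.zip s.tail).foldl pvStepA none := by
    rw [← pvPairs_map s, List.foldl_map]
    rfl
  rw [hA1]
  have hA2 : (PySem.List.pyRange 0 ((s.length : Int) - 1) 1).foldl (fun res i =>
      let diff : Int := |PySem.List.pyGetD s i 0 - PySem.List.pyGetD s (i + 1) 0|
      if some diff = (s.zip s.tail).foldl pvStepA none then
        res ++ [PySem.List.pyGetD s i 0, PySem.List.pyGetD s (i + 1) 0]
      else res) [] =
      (s.zip s.tail).foldl (fun r p =>
        if some (pvDiff p) = (s.zip s.tail).foldl pvStepA none then r ++ [p.1, p.2] else r) [] := by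
    rw [← pvPairs_map s]
    simp only [List.foldl_map]
    rfl
  rw [hA2, pvPair_main]
  rfl

-- ===== VERDICT (by name: the statement is the Claim_ definition above) =====
theorem closestNumbers_spec : Claim_equal_closestNumbers := by
  intro arr _
  show closestNumbers arr = closestNumbers_alt arr
  exact pvMain (PySem.List.sorted arr (fun x => x) false)
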